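-- pv_equiv track=rewrite | github.com/weber-jeff/numerology_ai | numerology/meanings/utils.py | get_reduced_date_components
-- ===== SOURCE A (Python) =====
-- def reduce_number(n: int, keep_master_as_is=True) -> int:
--     """Reduces a number to a single digit or a master number (11, 22, 33)."""
--     if keep_master_as_is and n in [11, 22, 33]: return n
--     s = str(n)
--     while len(s) > 1:
--         current_sum = sum(int(digit) for digit in s)
--         if keep_master_as_is and current_sum in [11, 22, 33] and len(str(current_sum)) == 2:
--             return current_sum
--         s = str(current_sum)
--         if len(s) == 1: break
--     return int(s)
--
-- def get_reduced_date_components(birth_date_str: str) -> tuple[int|str, int|str, int|str] | str: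
--     try:
--         parts = birth_date_str.split('-')
--         if len(parts) != 3: raise ValueError("Date must be YYYY-MM-DD")
--         year, month, day = int(parts[0]), int(parts[1]), int(parts[2])
--         r_month = reduce_number(month, keep_master_as_is=True)
--         r_day = reduce_number(day, keep_master_as_is=True)
--         year_sum_digits = sum(int(d) for d in str(year))
--         r_year = reduce_number(year_sum_digits, keep_master_as_is=True)
--         return r_month, r_day, r_year
--     except ValueError as ve: return f"Invalid date component: {ve}"
--     except Exception as e: return f"Error reducing date components: {e}"
-- ===== SOURCE B (Python) =====
-- # B: recursive digit-reduction (arithmetic single-digit test, tail recursion on the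
-- # digit sum) and a flat parse in the outer function, instead of A's while-loop.
--
-- def _reduce(n):
--     """Digit-reduce n; master numbers 11/22/33 are kept as they appear."""
--     if n in (11, 22, 33):
--         return n
--     if 0 <= n <= 9:
--         return n
--     t = sum(int(d) for d in str(n))  # a '-' sign raises ValueError, as in A
--     if t in (11, 22, 33):
--         return t
--     return _reduce(t)
--
-- def get_reduced_date_components(birth_date_str):
--     parts = birth_date_str.split('-')
--     if len(parts) != 3:
--         return "Invalid date component: Date must be YYYY-MM-DD"
--     try:
--         year, month, day = map(int, parts)
--         return (_reduce(month), _reduce(day),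
--                 _reduce(sum(int(d) for d in str(year))))
--     except ValueError as ve:
--         return f"Invalid date component: {ve}"
-- ===== Notes on version B (the rewrite author's own statement) =====
-- stated objective: alternative
-- what changed: The digit-reduction is rewritten as a tail recursion on the digit sum with an arithmetic single-digit test (0 <= n <= 9) replacing A's while-loop over string lengths and its redundant len(str(sum))==2 master guard, and the outer function replaces the parse-then-reduce try block's sequential assignments with a length check plus map(int, parts).
import Mathlib
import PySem

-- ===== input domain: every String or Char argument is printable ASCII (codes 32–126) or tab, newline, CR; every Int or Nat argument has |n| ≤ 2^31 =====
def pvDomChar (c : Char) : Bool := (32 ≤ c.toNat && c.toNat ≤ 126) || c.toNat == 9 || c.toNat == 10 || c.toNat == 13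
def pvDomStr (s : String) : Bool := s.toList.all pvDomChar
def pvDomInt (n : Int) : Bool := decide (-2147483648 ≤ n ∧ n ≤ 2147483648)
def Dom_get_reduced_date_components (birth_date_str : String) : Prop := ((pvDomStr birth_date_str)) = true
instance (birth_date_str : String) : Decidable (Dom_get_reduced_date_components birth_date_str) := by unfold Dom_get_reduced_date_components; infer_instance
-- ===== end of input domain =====

-- B replaces A's while-loop digit reduction by a tail recursion on the digit sum with an
-- arithmetic single-digit test, and the outer try/except by an Except-style flat parse
-- (return value only; `str()` of A's tuple/str result, as the harness compares strings).

-- ===== PORT A =====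
-- shared runtime helper: Python's repr of an ASCII string, truncated to 200 chars as in
-- CPython's "invalid literal for int() with base 10: %.200R" ValueError message
def pyReprChars (cs : List Char) : List Char :=
  let q : Char := if cs.contains '\'' && !cs.contains '"' then '"' else '\''
  (q :: cs.flatMap (fun c =>
    if c = '\\' then ['\\', '\\']
    else if c = q then ['\\', q]
    else if c = '\t' then ['\\', 't']
    else if c = '\n' then ['\\', 'n']
    else if c = '\r' then ['\\', 'r']
    else [c]) ++ [q]).take 200

def invalidMsg (p : String) : String :=
  "Invalid date component: invalid literal for int() with base 10: " ++ String.ofList (pyReprChars p.toList)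

-- sum(int(digit) for digit in s)  (left to right, first bad char raises = none)
def sumIntDigits? (cs : List Char) : Option Int :=
  cs.foldl (fun acc c => acc.bind (fun a => (PySem.Int.ofChars? [c]).map (fun d => a + d))) (some 0)

-- the while-loop of reduce_number; fuel only guards totality (value decreases each pass)
def loopA : Nat → List Char → Option Int
  | 0, _ => none
  | Nat.succ f, s =>
    if 1 < s.length then
      match sumIntDigits? s with
      | none => none
      | some cur =>
        if (cur = 11 ∨ cur = 22 ∨ cur = 33) ∧ (PySem.Int.toChars cur).length = 2 then some cur
        else
          let s' := PySem.Int.toChars cur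
          if s'.length = 1 then PySem.Int.ofChars? s'   -- break; return int(s)
          else loopA f s'
    else PySem.Int.ofChars? s

-- reduce_number(n, keep_master_as_is=True); none = the ValueError from int('-')
def reduce_numberA (n : Int) : Option Int :=
  if n = 11 ∨ n = 22 ∨ n = 33 then some n
  else loopA (n.natAbs + 1) (PySem.Int.toChars n)

def get_reduced_date_components (birth_date_str : String) : String :=
  match (PySem.Str.split? birth_date_str "-").getD [] with
  | [p0, p1, p2] =>
    match PySem.Int.ofStr? p0 with
    | none => invalidMsg p0
    | some year =>
      match PySem.Int.ofStr? p1 with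
      | none => invalidMsg p1
      | some month =>
        match PySem.Int.ofStr? p2 with
        | none => invalidMsg p2
        | some day =>
          match reduce_numberA month with
          | none => invalidMsg "-"
          | some r_month =>
            match reduce_numberA day with
            | none => invalidMsg "-"
            | some r_day =>
              match sumIntDigits? (PySem.Int.toChars year) with
              | none => invalidMsg "-"
              | some year_sum =>
                match reduce_numberA year_sum with
                | none => invalidMsg "-"
                | some r_year =>
                  "(" ++ PySem.Int.toStr r_month ++ ", " ++ PySem.Int.toStr r_day ++ ", "
                      ++ PySem.Int.toStr r_year ++ ")"
  | _ => "Invalid date component: Date must be YYYY-MM-DD"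

-- ===== PORT B =====
-- sum(int(d) for d in str(n)) written as mapM + sum
def digitTotal? (cs : List Char) : Option Int :=
  (cs.mapM (fun c => PySem.Int.ofChars? [c])).map List.sum

-- _reduce, a tail recursion on the digit sum; fuel only guards totality
def reduceB : Nat → Int → Except String Int
  | 0, _ => Except.error (invalidMsg "-")
  | Nat.succ f, n =>
    if n = 11 ∨ n = 22 ∨ n = 33 then Except.ok n
    else if 0 ≤ n ∧ n ≤ 9 then Except.ok n
    else
      match digitTotal? (PySem.Int.toChars n) with
      | none => Except.error (invalidMsg "-")
      | some t =>
        if t = 11 ∨ t = 22 ∨ t = 33 then Except.ok t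
        else reduceB f t

def reduce_alt (n : Int) : Except String Int := reduceB (n.natAbs + 1) n

def toIntE (p : String) : Except String Int :=
  match PySem.Int.ofStr? p with
  | none => Except.error (invalidMsg p)
  | some v => Except.ok v

def yearSumE (y : Int) : Except String Int :=
  match digitTotal? (PySem.Int.toChars y) with
  | none => Except.error (invalidMsg "-")
  | some t => Except.ok t

def get_reduced_date_components_alt (birth_date_str : String) : String :=
  let parts := (PySem.Str.split? birth_date_str "-").getD []
  if parts.length ≠ 3 then "Invalid date component: Date must be YYYY-MM-DD"
  else
    -- year, month, day = map(int, parts): the length-3 unpacking reads the three items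
    let r : Except String String := do
      let year ← toIntE (parts.getD 0 "")
      let month ← toIntE (parts.getD 1 "")
      let day ← toIntE (parts.getD 2 "")
      let rm ← reduce_alt month
      let rd ← reduce_alt day
      let ys ← yearSumE year
      let ry ← reduce_alt ys
      pure ("(" ++ PySem.Int.toStr rm ++ ", " ++ PySem.Int.toStr rd ++ ", "
               ++ PySem.Int.toStr ry ++ ")")
    match r with
    | Except.ok s => s
    | Except.error e => e

-- ===== PRECONDITION & SPEC =====
def Spec_get_reduced_date_components (birth_date_str : String) (out : String) : Prop := out = get_reduced_date_components_alt birth_date_str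
instance (birth_date_str : String) (out : String) : Decidable (Spec_get_reduced_date_components birth_date_str out) := by unfold Spec_get_reduced_date_components; infer_instance

-- ===== CLAIM (what is proved, stated in full; the proofs are below) =====
def Claim_equal_get_reduced_date_components : Prop := ∀ (birth_date_str : String), Dom_get_reduced_date_components birth_date_str → Spec_get_reduced_date_components birth_date_str (get_reduced_date_components birth_date_str)

-- ===== LEMMAS AND PROOFS =====

-- Option Int → Except String Int, with A's one possible reduce error message
def pvExceptOf (o : Option Int) : Except String Int :=
  match o with
  | none => Except.error (invalidMsg "-")
  | some v => Except.ok v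

lemma foldl_step_none (cs : List Char) :
    cs.foldl (fun acc c => acc.bind (fun a => (PySem.Int.ofChars? [c]).map (fun d => a + d))) none
      = none := by
  induction cs with
  | nil => rfl
  | cons c cs ih => simpa using ih

lemma sums_aux (cs : List Char) : ∀ a : Int,
    cs.foldl (fun acc c => acc.bind (fun a => (PySem.Int.ofChars? [c]).map (fun d => a + d))) (some a)
      = (cs.mapM (fun c => PySem.Int.ofChars? [c])).map (fun l => a + l.sum) := by
  induction cs with
  | nil => intro a; simp
  | cons c cs ih =>
    intro a
    rw [List.foldl_cons, List.mapM_cons]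
    cases h : PySem.Int.ofChars? [c] with
    | none =>
      have e0 : ((some a).bind fun a => Option.map (fun d => a + d) (none : Option Int)) = none := rfl
      rw [e0, foldl_step_none]
      simp
    | some v =>
      have e1 : ((some a).bind fun a => Option.map (fun d => a + d) (some v)) = some (a + v) := rfl
      rw [e1, ih (a + v)]
      cases hm : cs.mapM (fun c => PySem.Int.ofChars? [c]) with
      | none => simp
      | some l => simp [add_assoc]

-- the two digit-sum helpers agree
lemma sums_eq (cs : List Char) : digitTotal? cs = sumIntDigits? cs := by
  unfold digitTotal? sumIntDigits?
  rw [sums_aux cs 0]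
  cases hm : cs.mapM (fun c => PySem.Int.ofChars? [c]) with
  | none => simp
  | some l => simp

lemma ofChars?_digitChar (d : Nat) (h : d < 10) :
    PySem.Int.ofChars? [Nat.digitChar d] = some (d : Int) := by
  interval_cases d <;> decide

lemma toDigitsCore10_eq : ∀ (f n : Nat) (l : List Char), 0 < n → n < f →
    Nat.toDigitsCore 10 f n l = ((Nat.digits 10 n).map Nat.digitChar).reverse ++ l := by
  intro f
  induction f with
  | zero => intro n l h hf; omega
  | succ f ih =>
    intro n l h hf
    rw [Nat.toDigitsCore]
    rw [Nat.digits_def' (by norm_num : 1 < 10) h]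
    by_cases hq : n / 10 = 0
    · simp [hq]
    · simp only [hq, ite_false]
      rw [ih (n / 10) _ (Nat.pos_of_ne_zero hq) (by omega)]
      simp

lemma toChars_natCast_pos (m : Nat) (h : 0 < m) :
    PySem.Int.toChars (m : Int) = ((Nat.digits 10 m).map Nat.digitChar).reverse := by
  have hnn : ¬ ((m : Int) < 0) := by omega
  simp only [PySem.Int.toChars, hnn, if_false, Int.toNat_natCast]
  rw [Nat.toDigits, toDigitsCore10_eq (m + 1) m [] h (by omega)]
  simp

lemma fold_digit_list (ds : List Nat) : (∀ d ∈ ds, d < 10) → ∀ a : Int,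
    (ds.map Nat.digitChar).foldl
      (fun acc c => acc.bind (fun a => (PySem.Int.ofChars? [c]).map (fun d => a + d))) (some a)
      = some (a + (ds.sum : Int)) := by
  induction ds with
  | nil => intro _ a; simp
  | cons d ds ih =>
    intro h a
    rw [List.map_cons, List.foldl_cons]
    have e1 : ((some a).bind fun a => Option.map (fun x => a + x) (PySem.Int.ofChars? [Nat.digitChar d]))
        = some (a + (d : Int)) := by
      rw [ofChars?_digitChar d (h d (List.mem_cons_self))]; rfl
    rw [e1, ih (fun x hx => h x (List.mem_cons_of_mem _ hx)) (a + d)]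
    congr 1
    rw [List.sum_cons]
    push_cast
    ring

lemma sumIntDigits_toChars (m : Nat) :
    sumIntDigits? (PySem.Int.toChars (m : Int)) = some ((Nat.digits 10 m).sum : Int) := by
  rcases Nat.eq_zero_or_pos m with h0 | hp
  · subst h0; decide
  · unfold sumIntDigits?
    rw [toChars_natCast_pos m hp, ← List.map_reverse]
    rw [fold_digit_list _ (fun d hd => Nat.digits_lt_base (by norm_num) (List.mem_reverse.mp hd)) 0]
    simp

lemma toChars_len_one_of_small (n : Int) (h0 : 0 ≤ n) (h9 : n ≤ 9) :
    (PySem.Int.toChars n).length = 1 := by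
  interval_cases n <;> decide

lemma toChars_len_gt_one (m : Nat) (h : 10 ≤ m) :
    1 < (PySem.Int.toChars (m : Int)).length := by
  rw [toChars_natCast_pos m (by omega)]
  rw [Nat.digits_def' (by norm_num : 1 < 10) (by omega)]
  have hne : Nat.digits 10 (m / 10) ≠ [] := by
    rw [Nat.digits_ne_nil_iff_ne_zero]
    omega
  simp [List.length_pos_iff.mpr hne]

lemma ofChars?_toChars_small (n : Int) (h0 : 0 ≤ n) (h9 : n ≤ 9) :
    PySem.Int.ofChars? (PySem.Int.toChars n) = some n := by
  interval_cases n <;> decide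

lemma toChars_neg (n : Int) (h : n < 0) :
    PySem.Int.toChars n = '-' :: Nat.toDigits 10 n.natAbs := by
  simp [PySem.Int.toChars, h]

lemma sumIntDigits_neg (n : Int) (h : n < 0) : sumIntDigits? (PySem.Int.toChars n) = none := by
  unfold sumIntDigits?
  rw [toChars_neg n h, List.foldl_cons]
  have e0 : ((some (0:Int)).bind fun a => Option.map (fun d => a + d) (PySem.Int.ofChars? ['-'])) = none := rfl
  rw [e0, foldl_step_none]

lemma toDigits_ne_nil (m : Nat) : Nat.toDigits 10 m ≠ [] := by
  rcases Nat.eq_zero_or_pos m with h0 | hp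
  · subst h0; decide
  · rw [Nat.toDigits, toDigitsCore10_eq (m + 1) m [] hp (by omega)]
    simp [Nat.digits_ne_nil_iff_ne_zero.mpr (by omega : m ≠ 0)]

lemma toChars_neg_len (n : Int) (h : n < 0) : 1 < (PySem.Int.toChars n).length := by
  rw [toChars_neg n h]
  cases hd : Nat.toDigits 10 n.natAbs with
  | nil => exact absurd hd (toDigits_ne_nil n.natAbs)
  | cons x xs => simp

lemma dsum_lt (m : Nat) (h : 10 ≤ m) : (Nat.digits 10 m).sum < m := by
  rw [Nat.digits_def' (by norm_num : 1 < 10) (by omega)]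
  have h2 := Nat.digit_sum_le 10 (m / 10)
  simp only [List.sum_cons]
  omega

-- the loop of A and the recursion of B agree, step for step
lemma loop_eq_reduceB : ∀ (N f g : Nat), N < f → N < g → 10 ≤ N →
    ¬((N : Int) = 11 ∨ (N : Int) = 22 ∨ (N : Int) = 33) →
    pvExceptOf (loopA f (PySem.Int.toChars (N : Int))) = reduceB g (N : Int) := by
  intro N
  induction N using Nat.strong_induction_on with
  | _ N IH =>
    intro f g hf hg h10 hmast
    obtain ⟨f', rfl⟩ : ∃ k, f = k + 1 := ⟨f - 1, by omega⟩
    obtain ⟨g', rfl⟩ : ∃ k, g = k + 1 := ⟨g - 1, by omega⟩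
    rw [show (f' + 1 : Nat) = Nat.succ f' from rfl, show (g' + 1 : Nat) = Nat.succ g' from rfl]
    rw [loopA, reduceB]
    rw [if_pos (toChars_len_gt_one N h10)]
    rw [if_neg hmast, if_neg (by omega : ¬(0 ≤ (N : Int) ∧ (N : Int) ≤ 9))]
    rw [sums_eq, sumIntDigits_toChars N]
    dsimp only
    set tn : Nat := (Nat.digits 10 N).sum with htn
    have htlt : tn < N := dsum_lt N h10
    by_cases hmt : ((tn : Int) = 11 ∨ (tn : Int) = 22 ∨ (tn : Int) = 33)
    · have hl2 : (PySem.Int.toChars (tn : Int)).length = 2 := by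
        rcases hmt with h | h | h <;> rw [h] <;> decide
      rw [if_pos ⟨hmt, hl2⟩, if_pos hmt]
      rfl
    · rw [if_neg (fun hc => hmt hc.1), if_neg hmt]
      by_cases hts : tn ≤ 9
      · rw [if_pos (toChars_len_one_of_small (tn : Int) (by positivity) (by exact_mod_cast hts))]
        rw [ofChars?_toChars_small (tn : Int) (by positivity) (by exact_mod_cast hts)]
        obtain ⟨g'', rfl⟩ : ∃ k, g' = k + 1 := ⟨g' - 1, by omega⟩
        rw [show (g'' + 1 : Nat) = Nat.succ g'' from rfl, reduceB]
        rw [if_neg hmt, if_pos ⟨by positivity, by exact_mod_cast hts⟩]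
        rfl
      · have h10t : 10 ≤ tn := by omega
        rw [if_neg (by have := toChars_len_gt_one tn h10t; omega)]
        exact IH tn htlt f' g' (by omega) (by omega) h10t hmt

lemma reduce_eq (n : Int) : reduce_alt n = pvExceptOf (reduce_numberA n) := by
  unfold reduce_alt reduce_numberA
  have hfs : n.natAbs + 1 = Nat.succ n.natAbs := rfl
  by_cases hm : (n = 11 ∨ n = 22 ∨ n = 33)
  · rw [if_pos hm, hfs, reduceB, if_pos hm]
    rfl
  · rw [if_neg hm]
    by_cases hneg : n < 0
    · rw [hfs, loopA, reduceB, if_pos (toChars_neg_len n hneg)]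
      rw [if_neg hm, if_neg (by omega : ¬(0 ≤ n ∧ n ≤ 9))]
      rw [sums_eq, sumIntDigits_neg n hneg]
      rfl
    · by_cases hsmall : n ≤ 9
      · rw [hfs, loopA, reduceB]
        rw [if_neg hm, if_pos ⟨by omega, hsmall⟩]
        rw [if_neg (by rw [toChars_len_one_of_small n (by omega) hsmall]; omega)]
        rw [ofChars?_toChars_small n (by omega) hsmall]
        rfl
      · have hcast : ((n.toNat : Int)) = n := Int.toNat_of_nonneg (by omega)
        have h10 : 10 ≤ n.toNat := by omega
        rw [show n.natAbs = n.toNat from by omega, ← hcast]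
        exact (loop_eq_reduceB n.toNat (n.toNat + 1) (n.toNat + 1) (by omega) (by omega) h10
          (by rw [hcast]; exact hm)).symm

-- ===== VERDICT (by name: the statement is the Claim_ definition above) =====
theorem get_reduced_date_components_spec : Claim_equal_get_reduced_date_components := by
  intro birth_date_str _
  unfold Spec_get_reduced_date_components
  unfold get_reduced_date_components get_reduced_date_components_alt
  generalize (PySem.Str.split? birth_date_str "-").getD [] = L
  match L with
  | [] => rfl
  | [_] => rfl
  | [_, _] => rfl
  | (_ :: _ :: _ :: _ :: r) =>
    rw [if_pos (by simp : (_ :: _ :: _ :: _ :: r : List String).length ≠ 3)]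
  | [p0, p1, p2] =>
    rw [if_neg (by simp : ¬(([p0, p1, p2] : List String).length ≠ 3))]
    simp only [toIntE, yearSumE, bind, Except.bind, List.getD, List.getElem?_cons_zero, List.getElem?_cons_succ, Option.getD_some]
    cases h0 : PySem.Int.ofStr? p0 with
    | none => rfl
    | some year =>
      cases h1 : PySem.Int.ofStr? p1 with
      | none => rfl
      | some month =>
        cases h2 : PySem.Int.ofStr? p2 with
        | none => rfl
        | some day =>
          dsimp only
          rw [reduce_eq month]
          cases hm : reduce_numberA month with
          | none => rfl
          | some rm =>
            rw [show pvExceptOf (some rm) = Except.ok rm from rfl]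
            dsimp only
            rw [reduce_eq day]
            cases hd : reduce_numberA day with
            | none => rfl
            | some rd =>
              rw [show pvExceptOf (some rd) = Except.ok rd from rfl]
              dsimp only
              rw [sums_eq]
              cases hy : sumIntDigits? (PySem.Int.toChars year) with
              | none => rfl
              | some ys =>
                dsimp only
                rw [reduce_eq ys]
                cases hr : reduce_numberA ys with
                | none => rfl
                | some ry => rfl
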